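-- pv_equiv track=rewrite | github.com/HarshithaModekurty/Parallel-Turbo-Decoder-ASIC-for-3GPP-LTE | tools/gen_lte_vectors.py | radix4_bmu_i
-- ===== SOURCE A (Python) =====
-- def wrap_metric(v: int) -> int:
--     return ((v + 512) & 0x3FF) - 512
--
-- def mod_add_i(a: int, b: int) -> int:
--     return wrap_metric(a + b)
--
-- def branch_metric_unit_i(lsys: int, lpar: int, lapri: int) -> tuple[int, int, int, int]:
--     tmp = mod_add_i(lsys, lapri)
--     return (
--         wrap_metric(mod_add_i(tmp, lpar) >> 1),
--         wrap_metric(mod_add_i(tmp, -lpar) >> 1),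
--         wrap_metric(mod_add_i(mod_add_i(-lsys, -lapri), lpar) >> 1),
--         wrap_metric(mod_add_i(mod_add_i(-lsys, -lapri), -lpar) >> 1),
--     )
--
-- def radix4_bmu_i(sys_even: int, sys_odd: int, par_even: int, par_odd: int, apri_even: int, apri_odd: int) -> list[int]:
--     g0 = branch_metric_unit_i(sys_even, par_even, apri_even)
--     g1 = branch_metric_unit_i(sys_odd, par_odd, apri_odd)
--     out = [0] * 16
--     for u0 in (0, 1):
--         for p0 in (0, 1):
--             for u1 in (0, 1):
--                 for p1 in (0, 1):
--                     idx = (u0 * 8) + (p0 * 4) + (u1 * 2) + p1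
--                     out[idx] = mod_add_i(g0[u0 * 2 + p0], g1[u1 * 2 + p1])
--     return out
-- ===== SOURCE B (Python) =====
-- def wrap_metric(v: int) -> int:
--     return ((v + 512) & 0x3FF) - 512
--
-- def mod_add_i(a: int, b: int) -> int:
--     return wrap_metric(a + b)
--
-- def _metric(s: int, p: int, ap: int, u: int, q: int) -> int:
--     # metric for trellis bits (u, q): flip signs instead of indexing a precomputed table
--     if u:
--         s, ap = -s, -ap
--     if q:
--         p = -p
--     return wrap_metric(mod_add_i(mod_add_i(s, ap), p) >> 1)
--
-- def radix4_bmu_i(sys_even: int, sys_odd: int, par_even: int, par_odd: int, apri_even: int, apri_odd: int) -> list[int]: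
--     out = []
--     for k in range(16):
--         e = _metric(sys_even, par_even, apri_even, (k >> 3) & 1, (k >> 2) & 1)
--         o = _metric(sys_odd, par_odd, apri_odd, (k >> 1) & 1, k & 1)
--         out.append(mod_add_i(e, o))
--     return out
-- ===== Notes on version B (the rewrite author's own statement) =====
-- stated objective: alternative
-- what changed: Instead of precomputing two 4-entry branch-metric tables and combining them with four nested binary loops that write into a preallocated list via reconstructed indices, B makes one flat pass over the 16 state indices and computes each metric directly from the raw inputs, selecting the sign flips from the index bits.
import Mathlib
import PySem

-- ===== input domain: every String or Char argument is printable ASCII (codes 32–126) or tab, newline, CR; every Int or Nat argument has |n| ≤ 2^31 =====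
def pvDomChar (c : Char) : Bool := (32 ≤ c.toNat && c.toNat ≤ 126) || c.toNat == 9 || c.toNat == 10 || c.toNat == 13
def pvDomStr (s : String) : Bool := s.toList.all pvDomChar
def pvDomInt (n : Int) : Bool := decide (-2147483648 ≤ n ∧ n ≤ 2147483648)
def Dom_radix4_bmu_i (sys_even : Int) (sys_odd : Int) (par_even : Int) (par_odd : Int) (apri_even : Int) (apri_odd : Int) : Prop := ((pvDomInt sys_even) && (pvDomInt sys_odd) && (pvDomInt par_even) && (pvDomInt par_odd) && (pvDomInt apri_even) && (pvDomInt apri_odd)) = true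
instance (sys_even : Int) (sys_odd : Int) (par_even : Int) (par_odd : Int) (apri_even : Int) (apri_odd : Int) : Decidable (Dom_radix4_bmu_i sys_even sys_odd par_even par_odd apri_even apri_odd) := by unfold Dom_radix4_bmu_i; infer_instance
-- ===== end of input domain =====

-- B replaces A's precomputed metric tuples and nested index-writing loops with one flat pass over the 16 state indices, computing each branch metric directly from the raw inputs via sign flips (alternative decomposition, same values, same order).


-- ===== PORT A =====
-- A-side helpers (literal transliterations of Source A's helpers)
def wrapMetricA (v : Int) : Int := PySem.Int.band (v + 512) 0x3FF - 512

def modAddA (a b : Int) : Int := wrapMetricA (a + b)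

def bmuA (lsys lpar lapri : Int) : List Int :=
  let tmp := modAddA lsys lapri
  [ wrapMetricA (modAddA tmp lpar >>> 1),
    wrapMetricA (modAddA tmp (-lpar) >>> 1),
    wrapMetricA (modAddA (modAddA (-lsys) (-lapri)) lpar >>> 1),
    wrapMetricA (modAddA (modAddA (-lsys) (-lapri)) (-lpar) >>> 1) ]

-- four nested loops over (0, 1) writing out[idx] in place, as in A
def radix4_bmu_i (sys_even : Int) (sys_odd : Int) (par_even : Int) (par_odd : Int) (apri_even : Int) (apri_odd : Int) : List Int :=
  let g0 := bmuA sys_even par_even apri_even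
  let g1 := bmuA sys_odd par_odd apri_odd
  let out : List Int := List.replicate 16 0
  [0, 1].foldl (fun out (u0 : Nat) =>
    [0, 1].foldl (fun out (p0 : Nat) =>
      [0, 1].foldl (fun out (u1 : Nat) =>
        [0, 1].foldl (fun out (p1 : Nat) =>
          let idx := u0 * 8 + p0 * 4 + u1 * 2 + p1
          out.set idx (modAddA (PySem.List.pyGetD g0 (↑(u0 * 2 + p0)) 0) (PySem.List.pyGetD g1 (↑(u1 * 2 + p1)) 0)))
          out) out) out) out

-- ===== PORT B =====
-- B-side helpers (Source B's helpers, transcribed)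
def wrapMetricB (v : Int) : Int := PySem.Int.band (v + 512) 0x3FF - 512

def modAddB (a b : Int) : Int := wrapMetricB (a + b)

-- Source B's _metric: flip signs according to the trellis bits, then one shared formula
def metricB (s p ap u q : Int) : Int :=
  let s := if u = 0 then s else -s
  let ap := if u = 0 then ap else -ap
  let p := if q = 0 then p else -p
  wrapMetricB (modAddB (modAddB s ap) p >>> 1)

-- single flat pass over the 16 state indices k, each metric computed from the raw inputs
def radix4_bmu_i_alt (sys_even : Int) (sys_odd : Int) (par_even : Int) (par_odd : Int) (apri_even : Int) (apri_odd : Int) : List Int :=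
  (PySem.List.pyRange 0 16 1).map (fun (k : Int) =>
    modAddB (metricB sys_even par_even apri_even (PySem.Int.band (k >>> 3) 1) (PySem.Int.band (k >>> 2) 1))
            (metricB sys_odd par_odd apri_odd (PySem.Int.band (k >>> 1) 1) (PySem.Int.band k 1)))

-- ===== PRECONDITION & SPEC =====
def Spec_radix4_bmu_i (sys_even : Int) (sys_odd : Int) (par_even : Int) (par_odd : Int) (apri_even : Int) (apri_odd : Int) (out : List Int) : Prop := out = radix4_bmu_i_alt sys_even sys_odd par_even par_odd apri_even apri_odd
instance (sys_even : Int) (sys_odd : Int) (par_even : Int) (par_odd : Int) (apri_even : Int) (apri_odd : Int) (out : List Int) : Decidable (Spec_radix4_bmu_i sys_even sys_odd par_even par_odd apri_even apri_odd out) := by unfold Spec_radix4_bmu_i; infer_instance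

-- ===== CLAIM (what is proved, stated in full; the proofs are below) =====
def Claim_equal_radix4_bmu_i : Prop := ∀ (sys_even : Int) (sys_odd : Int) (par_even : Int) (par_odd : Int) (apri_even : Int) (apri_odd : Int), Dom_radix4_bmu_i sys_even sys_odd par_even par_odd apri_even apri_odd → Spec_radix4_bmu_i sys_even sys_odd par_even par_odd apri_even apri_odd (radix4_bmu_i sys_even sys_odd par_even par_odd apri_even apri_odd)

-- ===== LEMMAS AND PROOFS =====

-- ===== VERDICT (by name: the statement is the Claim_ definition above) =====
theorem radix4_bmu_i_spec : Claim_equal_radix4_bmu_i := by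
  intro s0 s1 p0 p1 a0 a1 _
  show _ = _
  rfl
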